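-- pv_equiv track=rewrite | github.com/yeongminChae/Python-Practice | 40~60/50.py | func
-- ===== SOURCE A (Python) =====
-- def func(a):
--     n = 0
--     m = 0
--     k = 10
--
--     for i in range(len(a)):
--         if i + 1 == len(a):
--             break
--         if a[i] == a[i + 1]:
--             n += 1
--         else:
--             m += 1
--
--     a = k + n*5 + m*10
--     return a
-- ===== SOURCE B (Python) =====
-- def func(a):
--     # Traverse the list run by run: each maximal run of length L contributes
--     # 5*(L-1) (equal adjacent pairs inside it) and each boundary between two
--     # runs contributes 10 (one unequal adjacent pair).
--     score = 10
--     i = 0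
--     length = len(a)
--     while i < length:
--         j = i
--         while j + 1 < length and a[j + 1] == a[j]:
--             j += 1
--         score += 5 * (j - i)
--         if j + 1 < length:
--             score += 10
--         i = j + 1
--     return score
-- ===== Notes on version B (the rewrite author's own statement) =====
-- stated objective: alternative
-- what changed: Replaces A's uniform per-index pass with two counters by a run-decomposition traversal: an outer loop over maximal runs of equal values with an inner skip to each run's end, adding 5 per intra-run pair and 10 per run boundary directly to the score.
import Mathlib
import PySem

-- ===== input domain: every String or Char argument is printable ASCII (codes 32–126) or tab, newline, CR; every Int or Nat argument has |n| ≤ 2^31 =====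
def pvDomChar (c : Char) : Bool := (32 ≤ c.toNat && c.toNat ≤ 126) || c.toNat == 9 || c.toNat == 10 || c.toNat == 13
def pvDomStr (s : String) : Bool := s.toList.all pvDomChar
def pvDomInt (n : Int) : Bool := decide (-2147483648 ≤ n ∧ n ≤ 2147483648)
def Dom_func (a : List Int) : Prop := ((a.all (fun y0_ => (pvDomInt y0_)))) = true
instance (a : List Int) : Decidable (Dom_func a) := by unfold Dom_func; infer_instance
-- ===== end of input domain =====

-- B replaces A's uniform per-index pass with two counters by a run-decomposition
-- traversal (outer loop over maximal runs, inner skip to each run's end),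
-- scoring 5 per intra-run pair and 10 per run boundary (objective: alternative).

-- ===== PORT A =====
-- for i in range(len(a)): break at i+1 == len(a); count equal/unequal adjacent pairs
def funcGo (a : List Int) (i : Nat) (n m : Int) : Int × Int :=
  if i < a.length then
    if i + 1 = a.length then (n, m)
    else if a.getD i 0 = a.getD (i + 1) 0 then funcGo a (i + 1) (n + 1) m
    else funcGo a (i + 1) n (m + 1)
  else (n, m)
termination_by a.length - i

def func (a : List Int) : Int :=
  let k : Int := 10
  let (n, m) := funcGo a 0 0 0
  k + n * 5 + m * 10

-- ===== PORT B =====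
-- inner while loop: skip j to the end of the run starting at j
def runEnd (a : List Int) (j : Nat) : Nat :=
  if j + 1 < a.length ∧ a.getD (j + 1) 0 = a.getD j 0 then runEnd a (j + 1)
  else j
termination_by a.length - j

theorem runEnd_ge (a : List Int) (j : Nat) : j ≤ runEnd a j := by
  fun_induction runEnd a j with
  | case1 j h ih => omega
  | case2 j h => omega

-- outer while loop: one iteration per maximal run
def altGo (a : List Int) (i : Nat) (score : Int) : Int :=
  if _h : i < a.length then
    let j := runEnd a i
    altGo a (j + 1)
      (score + 5 * ((j : Int) - (i : Int)) + (if j + 1 < a.length then 10 else 0))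
  else score
termination_by a.length - i
decreasing_by have := runEnd_ge a i; omega

def func_alt (a : List Int) : Int := altGo a 0 10

-- ===== PRECONDITION & SPEC =====
def Spec_func (a : List Int) (out : Int) : Prop := out = func_alt a
instance (a : List Int) (out : Int) : Decidable (Spec_func a out) := by unfold Spec_func; infer_instance

-- ===== CLAIM (what is proved, stated in full; the proofs are below) =====
def Claim_equal_func : Prop := ∀ (a : List Int), Dom_func a → Spec_func a (func a)

-- ===== LEMMAS AND PROOFS =====

-- weighted score of the adjacent pairs of l: 5 per equal pair, 10 per unequal pair
def S : List Int → Int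
  | x :: y :: t => (if x = y then 5 else 10) + S (y :: t)
  | _ => 0

theorem S_short (l : List Int) (h : l.length ≤ 1) : S l = 0 := by
  match l, h with
  | [], _ => rfl
  | [x], _ => rfl

theorem S_drop (a : List Int) (i : Nat) (h : i + 1 < a.length) :
    S (a.drop i) = (if a[i] = a[i+1] then 5 else 10) + S (a.drop (i + 1)) := by
  have hi : i < a.length := by omega
  rw [List.drop_eq_getElem_cons hi, List.drop_eq_getElem_cons h, S, ← List.drop_eq_getElem_cons h]

theorem funcGo_spec : ∀ (a : List Int) (i : Nat) (n m : Int),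
    (funcGo a i n m).1 * 5 + (funcGo a i n m).2 * 10 = n * 5 + m * 10 + S (a.drop i) := by
  intro a i n m
  fun_induction funcGo a i n m with
  | case1 i n m hlt hlast =>
    rw [S_short _ (by simp [List.length_drop]; omega)]; simp
  | case2 i n m hlt hlast heq ih =>
    have h1 : i + 1 < a.length := by omega
    have hv : a[i] = a[i+1] := by
      rwa [List.getD_eq_getElem a 0 hlt, List.getD_eq_getElem a 0 h1] at heq
    rw [ih, S_drop a i h1, if_pos hv]; ring
  | case3 i n m hlt hlast heq ih =>
    have h1 : i + 1 < a.length := by omega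
    have hv : ¬ a[i] = a[i+1] := by
      rwa [List.getD_eq_getElem a 0 hlt, List.getD_eq_getElem a 0 h1] at heq
    rw [ih, S_drop a i h1, if_neg hv]; ring
  | case4 i n m hge =>
    rw [S_short _ (by simp [List.length_drop]; omega)]; simp

-- the inner skip accounts for 5 per step: S (drop j) = 5*(runEnd-j) + boundary + S (drop (runEnd+1))
theorem runEnd_S (a : List Int) (j : Nat) (h : j < a.length) :
    S (a.drop j) = 5 * ((runEnd a j : Int) - (j : Int)) +
      (if runEnd a j + 1 < a.length then 10 else 0) + S (a.drop (runEnd a j + 1)) := by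
  fun_induction runEnd a j with
  | case1 j h' ih =>
    obtain ⟨h1, heq⟩ := h'
    have hv : a[j] = a[j+1] := by
      rw [List.getD_eq_getElem a 0 (by omega : j < a.length), List.getD_eq_getElem a 0 h1] at heq
      exact heq.symm
    have := runEnd_ge a (j + 1)
    rw [S_drop a j h1, if_pos hv, ih (by omega)]
    push_cast; ring
  | case2 j h' =>
    by_cases hb : j + 1 < a.length
    · have hv : ¬ a[j] = a[j+1] := by
        intro hc
        exact h' ⟨hb, by rw [List.getD_eq_getElem a 0 h, List.getD_eq_getElem a 0 hb]; exact hc.symm⟩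
      rw [S_drop a j hb, if_neg hv, if_pos hb]; ring
    · rw [S_short _ (by simp [List.length_drop]; omega),
        S_short _ (by simp [List.length_drop]; omega), if_neg hb]
      simp

theorem altGo_spec : ∀ (a : List Int) (i : Nat) (s : Int),
    altGo a i s = s + S (a.drop i) := by
  intro a i s
  fun_induction altGo a i s with
  | case1 i s h j ih =>
    simp only [dite_eq_ite] at ih
    rw [ih, runEnd_S a i h]; ring
  | case2 i s h =>
    rw [S_short _ (by simp [List.length_drop]; omega)]; simp

-- ===== VERDICT (by name: the statement is the Claim_ definition above) =====
theorem func_spec : Claim_equal_func := by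
  intro a _
  unfold Spec_func func func_alt
  have h := funcGo_spec a 0 0 0
  rw [altGo_spec]
  simp only [List.drop_zero] at *
  omega
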